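-- pv_equiv track=rewrite | github.com/MikesHorcrux/ABAProviderIntelligenceEngine | cli/ae.py | _extract_output_format
-- ===== SOURCE A (Python) =====
-- from typing import Sequence
--
-- def _extract_output_format(argv: Sequence[str]) -> str:
--     output_format = "plain"
--     for arg in argv:
--         if arg == "--json":
--             output_format = "json"
--         elif arg == "--plain":
--             output_format = "plain"
--     return output_format
-- ===== SOURCE B (Python) =====
-- from typing import Sequence
--
-- def _extract_output_format(argv: Sequence[str]) -> str:
--     for arg in reversed(argv):
--         if arg == "--json":
--             return "json"
--         if arg == "--plain":
--             return "plain"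
--     return "plain"
-- ===== Notes on version B (the rewrite author's own statement) =====
-- stated objective: idiomatic
-- what changed: B scans argv from the end and returns eagerly on the first flag found (the last-winning flag), instead of A's full forward pass accumulating state.
import Mathlib
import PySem

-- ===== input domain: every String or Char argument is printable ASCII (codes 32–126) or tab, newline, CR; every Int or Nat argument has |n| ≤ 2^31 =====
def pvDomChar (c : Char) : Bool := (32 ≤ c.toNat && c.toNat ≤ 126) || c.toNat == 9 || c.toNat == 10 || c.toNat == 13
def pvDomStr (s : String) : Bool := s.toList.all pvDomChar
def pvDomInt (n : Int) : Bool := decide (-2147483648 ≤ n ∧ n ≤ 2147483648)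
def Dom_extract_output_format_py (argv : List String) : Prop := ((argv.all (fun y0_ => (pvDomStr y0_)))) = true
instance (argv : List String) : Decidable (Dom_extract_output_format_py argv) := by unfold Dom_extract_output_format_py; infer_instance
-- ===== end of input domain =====

-- B scans argv from the end and returns eagerly on the first flag found; A accumulates over a full forward pass. Same value everywhere.

-- ===== PORT A =====
-- forward loop accumulating output_format, started at "plain"
def extract_output_format_py (argv : List String) : String :=
  argv.foldl
    (fun output_format arg =>
      if arg == "--json" then "json"
      else if arg == "--plain" then "plain"
      else output_format)
    "plain"

-- ===== PORT B =====
-- early-return loop over reversed(argv)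
def pvBackScan (l : List String) : String :=
  match l with
  | [] => "plain"
  | arg :: rest =>
    if arg == "--json" then "json"
    else if arg == "--plain" then "plain"
    else pvBackScan rest

def extract_output_format_py_alt (argv : List String) : String :=
  pvBackScan argv.reverse

-- ===== PRECONDITION & SPEC =====
def Spec_extract_output_format_py (argv : List String) (out : String) : Prop := out = extract_output_format_py_alt argv
instance (argv : List String) (out : String) : Decidable (Spec_extract_output_format_py argv out) := by unfold Spec_extract_output_format_py; infer_instance

-- ===== CLAIM (what is proved, stated in full; the proofs are below) =====
def Claim_equal_extract_output_format_py : Prop := ∀ (argv : List String), Dom_extract_output_format_py argv → Spec_extract_output_format_py argv (extract_output_format_py argv)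

-- ===== LEMMAS AND PROOFS =====

-- key lemma: folding forward with accumulator acc equals back-scanning the reverse,
-- with acc as the fallback when no flag occurs
def pvBackScanAcc (l : List String) (acc : String) : String :=
  match l with
  | [] => acc
  | arg :: rest =>
    if arg == "--json" then "json"
    else if arg == "--plain" then "plain"
    else pvBackScanAcc rest acc

theorem pvBackScanAcc_snoc (l : List String) (x acc : String) :
    pvBackScanAcc (l ++ [x]) acc =
      pvBackScanAcc l (if x == "--json" then "json" else if x == "--plain" then "plain" else acc) := by
  induction l with
  | nil => simp [pvBackScanAcc]
  | cons a t ih => simp [pvBackScanAcc, ih]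

theorem foldl_eq_backScanAcc (l : List String) (acc : String) :
    l.foldl
      (fun output_format arg =>
        if arg == "--json" then "json"
        else if arg == "--plain" then "plain"
        else output_format) acc
    = pvBackScanAcc l.reverse acc := by
  induction l generalizing acc with
  | nil => simp [pvBackScanAcc]
  | cons a t ih =>
      simp only [List.foldl_cons, List.reverse_cons, ih, pvBackScanAcc_snoc]

theorem pvBackScanAcc_plain (l : List String) : pvBackScanAcc l "plain" = pvBackScan l := by
  induction l with
  | nil => rfl
  | cons a t ih => simp [pvBackScanAcc, pvBackScan, ih]

-- ===== VERDICT (by name: the statement is the Claim_ definition above) =====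
theorem extract_output_format_py_spec : Claim_equal_extract_output_format_py := by
  intro argv _
  unfold Spec_extract_output_format_py extract_output_format_py extract_output_format_py_alt
  rw [foldl_eq_backScanAcc, pvBackScanAcc_plain]
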